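-- pv_equiv track=rewrite | github.com/ikokkari/PythonProblems | labs109.py | super_tiny_rng
-- ===== SOURCE A (Python) =====
-- def super_tiny_rng(seed, n, bits):
--     result, x = [], seed
--     for _ in range(n):
--         r = 0
--         for _ in range(bits):
--             x = (x + (x*x | 5)) & 0xFFFFFFFF
--             r = 2*r + ((x & (1 << 31)) >> 31)
--         result.append(r)
--     return result
-- ===== SOURCE B (Python) =====
-- def super_tiny_rng(seed, n, bits):
--     # Phase 1: one flat pass of n*bits state updates, recording each top bit.
--     x = seed
--     bitstream = []
--     for _ in range(max(n, 0) * max(bits, 0)):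
--         x = (x + (x * x | 5)) & 0xFFFFFFFF
--         bitstream.append((x >> 31) & 1)
--     # Phase 2: regroup the flat bitstream into n numbers, MSB-first.
--     result = []
--     for i in range(n):
--         r = 0
--         for b in bitstream[i * bits:(i + 1) * bits]:
--             r = 2 * r + b
--         result.append(r)
--     return result
-- ===== Notes on version B (the rewrite author's own statement) =====
-- stated objective: alternative
-- what changed: Replaces A's nested generate-and-accumulate loop by a two-phase pipeline: one flat loop of n*bits state updates producing a bitstream, then a separate regrouping pass that folds consecutive bits-sized chunks into the output integers.
import Mathlib
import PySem

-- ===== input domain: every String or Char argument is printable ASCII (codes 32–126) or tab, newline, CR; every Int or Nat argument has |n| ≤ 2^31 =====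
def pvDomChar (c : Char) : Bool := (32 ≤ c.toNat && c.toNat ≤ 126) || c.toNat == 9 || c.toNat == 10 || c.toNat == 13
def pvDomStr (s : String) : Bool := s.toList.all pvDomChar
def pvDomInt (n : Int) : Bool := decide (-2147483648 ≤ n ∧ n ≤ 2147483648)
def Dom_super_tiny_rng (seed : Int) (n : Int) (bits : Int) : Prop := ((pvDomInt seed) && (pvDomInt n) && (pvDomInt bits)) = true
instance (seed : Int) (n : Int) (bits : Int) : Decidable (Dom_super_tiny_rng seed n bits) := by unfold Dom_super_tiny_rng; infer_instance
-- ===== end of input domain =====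

-- B restructures A's nested generate-and-accumulate loop into a two-phase pipeline
-- (flat bitstream generation, then chunk regrouping); same cost, alternative structure.


-- ===== PORT A =====
def super_tiny_rng (seed : Int) (n : Int) (bits : Int) : List Int :=
  ((PySem.List.pyRange 0 n 1).foldl
    (fun (s : List Int × Int) _ =>
      let p := (PySem.List.pyRange 0 bits 1).foldl
        (fun (q : Int × Int) _ =>
          let x := PySem.Int.band (q.1 + PySem.Int.bor (q.1 * q.1) 5) 0xFFFFFFFF
          (x, 2 * q.2 + (PySem.Int.band x ((1:Int) <<< 31) >>> (31:Nat))))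
        (s.2, 0)
      (s.1 ++ [p.2], p.1))
    ([], seed)).1

-- ===== PORT B =====
def super_tiny_rng_alt (seed : Int) (n : Int) (bits : Int) : List Int :=
  -- Phase 1: one flat pass of n*bits state updates, recording each top bit.
  let bs := (PySem.List.pyRange 0 (max n 0 * max bits 0) 1).foldl
    (fun (s : List Int × Int) _ =>
      let x := PySem.Int.band (s.2 + PySem.Int.bor (s.2 * s.2) 5) 0xFFFFFFFF
      (s.1 ++ [PySem.Int.band (x >>> (31:Nat)) 1], x))
    ([], seed)
  -- Phase 2: regroup the flat bitstream into n numbers, MSB-first.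
  (PySem.List.pyRange 0 n 1).foldl
    (fun (res : List Int) i =>
      res ++ [(PySem.List.slice bs.1 (some (i * bits)) (some ((i + 1) * bits))).foldl
                (fun r b => 2 * r + b) 0])
    []

-- ===== PRECONDITION & SPEC =====
def Spec_super_tiny_rng (seed : Int) (n : Int) (bits : Int) (out : List Int) : Prop := out = super_tiny_rng_alt seed n bits
instance (seed : Int) (n : Int) (bits : Int) (out : List Int) : Decidable (Spec_super_tiny_rng seed n bits out) := by unfold Spec_super_tiny_rng; infer_instance

-- ===== CLAIM (what is proved, stated in full; the proofs are below) =====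
def Claim_equal_super_tiny_rng : Prop := ∀ (seed : Int) (n : Int) (bits : Int), Dom_super_tiny_rng seed n bits → Spec_super_tiny_rng seed n bits (super_tiny_rng seed n bits)

-- ===== LEMMAS AND PROOFS =====

-- the PRNG step, the top-bit extraction, and the abstract bitstream
def pvStep (x : Int) : Int := PySem.Int.band (x + PySem.Int.bor (x * x) 5) 0xFFFFFFFF
def pvBit (x : Int) : Int := PySem.Int.band (x >>> (31:Nat)) 1
def pvStream (x : Int) : Nat → List Int
  | 0 => []
  | k + 1 => pvBit (pvStep x) :: pvStream (pvStep x) k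
def pvFold (r : Int) (l : List Int) : Int := l.foldl (fun r b => 2 * r + b) r

theorem pvNatBit (m : Nat) : (m &&& 2147483648) >>> 31 = (m >>> 31) &&& 1 := by
  apply Nat.eq_of_testBit_eq
  intro j
  have h1 : (m >>> 31) % 2 = (m >>> 31) % 2 ^ 1 := by norm_num
  simp [Nat.testBit_shiftRight, Nat.testBit_and, h1, Nat.testBit_mod_two_pow]
  cases j with
  | zero => simp [show Nat.testBit 2147483648 31 = true by decide]
  | succ k =>
    have h3 : Nat.testBit 2147483648 (31 + (k + 1)) = false := by
      have h2 : (2147483648 : Nat) = 2 ^ 31 := by norm_num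
      rw [h2, Nat.testBit_two_pow]; simp
    simp [h3]

-- A's bit expression equals B's on nonnegative state
theorem pvBitEq (a : Int) (h : 0 ≤ a) :
    PySem.Int.band a ((1:Int) <<< 31) >>> (31:Nat) = PySem.Int.band (a >>> (31:Nat)) 1 := by
  obtain ⟨m, rfl⟩ := Int.eq_ofNat_of_zero_le h
  rw [PySem.Int.band_one, show ((1:Int) <<< 31) = ((2147483648:Int)) by decide,
      PySem.Int.band_of_nonneg (by positivity) (by norm_num)]
  have hs : ((m:Int) >>> (31:Nat)) = ((m >>> 31 : Nat) : Int) := by simp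
  rw [hs]
  have hm : PySem.Int.mod ((m >>> 31 : Nat) : Int) 2 = (((m >>> 31) % 2 : Nat) : Int) := by
    exact_mod_cast PySem.Int.mod_natCast (m >>> 31) 2
  rw [hm]
  have h4 : ((m:Int).toNat &&& (2147483648:Int).toNat) = (m &&& 2147483648) := by simp
  rw [h4]
  have hs2 : (((m &&& 2147483648 : Nat)):Int) >>> (31:Nat) = (((m &&& 2147483648) >>> 31 : Nat) : Int) := by simp
  rw [hs2, pvNatBit, Nat.and_one_is_mod]

theorem pvStep_nonneg (x : Int) : 0 ≤ pvStep x := by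
  unfold pvStep
  rw [PySem.Int.band_comm]
  exact PySem.Int.band_nonneg_of_nonneg_left _ (by norm_num)

theorem pvBitEq_step (x : Int) :
    PySem.Int.band (pvStep x) ((1:Int) <<< 31) >>> (31:Nat) = pvBit (pvStep x) :=
  pvBitEq _ (pvStep_nonneg x)

theorem pvStream_length (x : Int) (k : Nat) : (pvStream x k).length = k := by
  induction k generalizing x with
  | zero => rfl
  | succ k ih => simp [pvStream, ih]

theorem pvStream_add (x : Int) (j k : Nat) :
    pvStream x (j + k) = pvStream x j ++ pvStream (pvStep^[j] x) k := by
  induction j generalizing x with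
  | zero => simp [pvStream]
  | succ j ih =>
    have : j + 1 + k = (j + k) + 1 := by omega
    rw [this]
    simp only [pvStream, Function.iterate_succ_apply, ih (pvStep x), List.cons_append]

-- a foldl that ignores the list elements is an iterate of its body
theorem pvFoldl_const {α β : Type} (l : List α) (g : β → β) (s : β) :
    l.foldl (fun a _ => g a) s = g^[l.length] s := by
  induction l generalizing s with
  | nil => rfl
  | cons a l ih => simp [List.foldl_cons, ih, Function.iterate_succ_apply]

def pvInnerF : Int × Int → Int × Int := fun q =>
  (pvStep q.1, 2 * q.2 + (PySem.Int.band (pvStep q.1) ((1:Int) <<< 31) >>> (31:Nat)))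

def pvOuterF (B : Nat) : List Int × Int → List Int × Int := fun s =>
  let p := pvInnerF^[B] (s.2, 0)
  (s.1 ++ [p.2], p.1)

-- A's inner loop characterised by the abstract bitstream
theorem pvInner (k : Nat) (x r : Int) :
    pvInnerF^[k] (x, r) = (pvStep^[k] x, pvFold r (pvStream x k)) := by
  induction k generalizing x r with
  | zero => simp [pvStream, pvFold]
  | succ k ih =>
    rw [Function.iterate_succ_apply,
        show pvInnerF (x, r) = (pvStep x, 2 * r + pvBit (pvStep x)) by
          simp [pvInnerF, pvBitEq_step],
        ih]
    simp [pvStream, pvFold]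

theorem pvOuterF_apply (B : Nat) (acc : List Int) (x : Int) :
    pvOuterF B (acc, x) = (acc ++ [pvFold 0 (pvStream x B)], pvStep^[B] x) := by
  simp [pvOuterF, pvInner]

-- A's outer loop: the result list is a map over the number index
theorem pvOuter (B : Nat) (m : Nat) (acc : List Int) (x : Int) :
    ((pvOuterF B)^[m] (acc, x)).1
      = acc ++ (List.range m).map (fun i => pvFold 0 (pvStream (pvStep^[i * B] x) B)) := by
  induction m generalizing acc x with
  | zero => simp
  | succ m ih =>
    rw [Function.iterate_succ_apply, pvOuterF_apply, ih]
    rw [List.range_succ_eq_map, List.map_cons, List.map_map,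
        List.append_assoc, List.singleton_append]
    congr 1
    congr 1
    · simp
    · congr 1
      funext i
      simp only [Function.comp_apply]
      rw [show (i + 1) * B = i * B + B by ring, Function.iterate_add_apply]

-- B's phase-1 loop: the accumulated list is the abstract bitstream
def pvPhase1F : List Int × Int → List Int × Int := fun s =>
  (s.1 ++ [pvBit (pvStep s.2)], pvStep s.2)

theorem pvPhase1 (k : Nat) (acc : List Int) (x : Int) :
    pvPhase1F^[k] (acc, x) = (acc ++ pvStream x k, pvStep^[k] x) := by
  induction k generalizing acc x with
  | zero => simp [pvStream]
  | succ k ih =>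
    rw [Function.iterate_succ_apply,
        show pvPhase1F (acc, x) = (acc ++ [pvBit (pvStep x)], pvStep x) from rfl, ih]
    simp [pvStream]

-- the chunk B slices out of the stream is exactly A's i-th run of bits
theorem pvChunk (x : Int) (N B i : Nat) (hi : i < N) :
    PySem.List.slice (pvStream x (N * B)) (some ((i : Int) * (B:Int))) (some (((i:Int) + 1) * (B:Int)))
      = pvStream (pvStep^[i * B] x) B := by
  have hcast : ((i:Int) + 1) * (B:Int) = ((i * B : Nat) : Int) + ((B : Nat) : Int) := by push_cast; ring
  have hcast2 : (i : Int) * (B:Int) = ((i * B : Nat) : Int) := by push_cast; ring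
  rw [hcast, hcast2, PySem.List.slice_natCast_add]
  have hsplit : N * B = i * B + (B + (N - i - 1) * B) := by
    have h0 : N = i + (1 + (N - i - 1)) := by omega
    calc N * B = (i + (1 + (N - i - 1))) * B := by rw [← h0]
    _ = i * B + (B + (N - i - 1) * B) := by ring
  rw [hsplit, pvStream_add, List.drop_left' (pvStream_length x (i * B)),
      pvStream_add, List.take_left' (pvStream_length _ B)]

-- a slice of the empty list is empty
theorem pvSliceNil (a b : Int) : PySem.List.slice ([] : List Int) (some a) (some b) = [] := by
  apply List.eq_nil_of_length_eq_zero
  rw [PySem.List.length_slice]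
  have h1 := PySem.List.clampIdx_le (n := ([] : List Int).length) (i := b)
  have h2 := PySem.List.clampIdx_le (n := ([] : List Int).length) (i := a)
  simp only [List.length_nil] at h1 h2 ⊢
  omega

-- ===== VERDICT (by name: the statement is the Claim_ definition above) =====
theorem super_tiny_rng_spec : Claim_equal_super_tiny_rng := by
  intro seed n bits _
  unfold Spec_super_tiny_rng super_tiny_rng super_tiny_rng_alt
  -- the loop bodies are (definitionally) the named step functions
  have h2 : (fun (s : List Int × Int) (_ : Int) =>
      let p := (PySem.List.pyRange 0 bits 1).foldl
        (fun (q : Int × Int) _ =>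
          let x := PySem.Int.band (q.1 + PySem.Int.bor (q.1 * q.1) 5) 0xFFFFFFFF
          (x, 2 * q.2 + (PySem.Int.band x ((1:Int) <<< 31) >>> (31:Nat))))
        (s.2, 0)
      (s.1 ++ [p.2], p.1))
      = fun s _ => pvOuterF (PySem.List.pyRange 0 bits 1).length s := by
    funext s i
    show (let p := (PySem.List.pyRange 0 bits 1).foldl (fun q _ => pvInnerF q) (s.2, 0)
          (s.1 ++ [p.2], p.1)) = _
    rw [pvFoldl_const]
    rfl
  rw [h2, pvFoldl_const,
      show (fun (s : List Int × Int) (_ : Int) =>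
        let x := PySem.Int.band (s.2 + PySem.Int.bor (s.2 * s.2) 5) 0xFFFFFFFF
        (s.1 ++ [PySem.Int.band (x >>> (31:Nat)) 1], x)) = fun s _ => pvPhase1F s from rfl,
      pvFoldl_const, pvPhase1, pvOuter, PySem.List.foldl_append_singleton_eq_map]
  simp only [PySem.List.pyRange_one, List.map_map,
    List.nil_append, List.length_map, List.length_range]
  apply List.map_congr_left
  intro i hi
  rw [List.mem_range] at hi
  simp only [Function.comp_apply, zero_add, sub_zero] at *
  by_cases hbit : 0 ≤ bits
  · -- bits ≥ 0: the chunk lemma applies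
    obtain ⟨B, rfl⟩ := Int.eq_ofNat_of_zero_le hbit
    have hn0 : 0 ≤ n := by omega
    obtain ⟨N, rfl⟩ := Int.eq_ofNat_of_zero_le hn0
    rw [show max ((N:Nat):Int) 0 = ((N:Nat):Int) by omega,
        show max ((B:Nat):Int) 0 = ((B:Nat):Int) by omega]
    simp only [Int.toNat_natCast, ← Nat.cast_mul] at hi ⊢
    rw [show ((i * B : Nat) : Int) = (i : Int) * (B : Int) by push_cast; ring,
        pvChunk seed N B i hi]
    rfl
  · -- bits < 0: both chunks are empty (Python's inner range and B's slice are empty)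
    have hB : bits.toNat = 0 := by omega
    have hM : (max n 0 * max bits 0).toNat = 0 := by
      have : max bits 0 = 0 := by omega
      rw [this]; simp
    rw [hB, hM, show pvStream seed 0 = [] from rfl, pvSliceNil]
    rfl
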